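-- pv_equiv track=rewrite | github.com/hungrypro7/BaekjoonHub | 프로그래머스/4/118670. 행렬과 연산/행렬과 연산.py | solution
-- ===== SOURCE A (Python) =====
-- from collections import deque
--
-- def solution(rc, operations):
--     r, c = len(rc), len(rc[0])
--     l_col = deque([rc[i][0] for i in range(r)])
--     r_col = deque([rc[i][c-1] for i in range(r)])
--     rows = deque([deque(rc[i][1:c-1]) for i in range(r)])
--
--     for i in operations:
--         if i == "ShiftRow":
--             l_col.appendleft(l_col.pop())
--             rows.appendleft(rows.pop())
--             r_col.appendleft(r_col.pop())
--         else:
--             rows[0].appendleft(l_col.popleft())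
--             r_col.appendleft(rows[0].pop())
--             rows[r-1].append(r_col.pop())
--             l_col.append(rows[r-1].popleft())
--
--     answer = []
--     for i in range(r):
--         answer.append([l_col[i]] + list(rows[i]) + [r_col[i]])
--     return answer
-- ===== SOURCE B (Python) =====
-- def solution(rc, operations):
--     c = len(rc[0])
--     g = [row[:c] for row in rc]
--     for op in operations:
--         if op == "ShiftRow":
--             g = [g[-1]] + g[:-1]
--         else:
--             r = len(g)
--             top = [g[1][0]] + g[0][:c - 1]
--             mid = [[g[k + 2][0]] + g[k + 1][1:c - 1] + [g[k][c - 1]]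
--                    for k in range(r - 2)]
--             bot = g[r - 1][1:] + [g[r - 2][c - 1]]
--             g = [top] + mid + [bot]
--     return g
-- ===== Notes on version B (the rewrite author's own statement) =====
-- stated objective: simpler
-- what changed: B keeps one plain grid (list of row lists) instead of A's three deques (left column, middle rows, right column): ShiftRow moves the last row to the front, Rotate rebuilds the grid from an explicit index formula for the one-step clockwise boundary rotation; this trades A's O(1)-per-operation deque rotations for per-operation row rebuilds, so B is plainer but slower on huge inputs.
-- outside the precondition, e.g. on solution([[1], [2]], ['Rotate']): A returns [[2, 1], [2, 1]], B returns [[2], [1]]; on solution([[1, 2, 3]], ['Rotate']): A returns [[1, 3, 2]], B raises IndexError; on solution([[1]], []): A returns [[1, 1]], B returns [[1]]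
import Mathlib
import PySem

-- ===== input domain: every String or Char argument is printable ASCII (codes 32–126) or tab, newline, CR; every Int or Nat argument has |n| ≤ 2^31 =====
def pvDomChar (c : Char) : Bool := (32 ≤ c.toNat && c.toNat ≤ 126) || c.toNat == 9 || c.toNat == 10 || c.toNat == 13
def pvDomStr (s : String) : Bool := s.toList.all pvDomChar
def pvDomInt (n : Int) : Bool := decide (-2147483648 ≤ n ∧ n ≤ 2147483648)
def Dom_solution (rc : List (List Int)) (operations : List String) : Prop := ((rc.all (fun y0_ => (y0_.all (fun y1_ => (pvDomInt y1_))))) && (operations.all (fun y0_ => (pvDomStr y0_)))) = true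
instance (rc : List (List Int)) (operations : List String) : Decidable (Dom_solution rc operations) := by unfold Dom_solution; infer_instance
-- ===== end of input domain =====

-- B replaces A's three boundary deques (left column / middle rows / right column) by one plain
-- grid of rows, rebuilt per Rotate from an explicit index formula; objective: simpler (not faster).

-- ===== PORT A =====
-- one loop iteration of A: state = (l_col, rows, r_col); deque pops on empty deques
-- (unreachable under Pre_solution) take a default instead of Python's IndexError
def pvStepA (r : Nat) (s : List Int × List (List Int) × List Int) (op : String) :
    List Int × List (List Int) × List Int :=
  if op == "ShiftRow" then
    (s.1.getLastD 0 :: s.1.dropLast,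
     s.2.1.getLastD [] :: s.2.1.dropLast,
     s.2.2.getLastD 0 :: s.2.2.dropLast)
  else
    let L := s.1; let M := s.2.1; let R := s.2.2
    let a := L.headD 0                       -- l_col.popleft()
    let L := L.tail
    let row0 := a :: M.headD []              -- rows[0].appendleft(a)
    let b := row0.getLastD 0                 -- rows[0].pop()
    let row0 := row0.dropLast
    let R := b :: R                          -- r_col.appendleft(b)
    let M := M.set 0 row0
    let z := R.getLastD 0                    -- r_col.pop()
    let R := R.dropLast
    let rowl := M.getD (r-1) [] ++ [z]       -- rows[r-1].append(z)
    let y := rowl.headD 0                    -- rows[r-1].popleft()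
    let rowl := rowl.tail
    let L := L ++ [y]                        -- l_col.append(y)
    let M := M.set (r-1) rowl
    (L, M, R)

def solution (rc : List (List Int)) (operations : List String) : List (List Int) :=
  let r := rc.length
  let c := (rc.headD []).length              -- len(rc[0]); rc = [] raises, excluded by Pre_
  let lcol := (List.range r).map (fun i => (rc.getD i []).getD 0 0)
  let rcol := (List.range r).map (fun i => (rc.getD i []).getD (c-1) 0)
  let rows := (List.range r).map (fun i => PySem.List.slice (rc.getD i []) (some 1) (some ((c:Int)-1)))
  let s := operations.foldl (pvStepA r) (lcol, rows, rcol)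
  (List.range r).map (fun i => s.1.getD i 0 :: s.2.1.getD i [] ++ [s.2.2.getD i 0])

-- ===== PORT B =====
-- one loop iteration of B on the whole grid
def pvStepB (c : Nat) (g : List (List Int)) (op : String) : List (List Int) :=
  if op == "ShiftRow" then
    PySem.List.pyGetD g (-1) [] :: PySem.List.slice g none (some (-1))     -- [g[-1]] + g[:-1]
  else
    let r := g.length
    let top := (g.getD 1 []).getD 0 0 :: PySem.List.slice (g.getD 0 []) none (some ((c:Int)-1))
    let mid := (List.range (r-2)).map (fun k =>
      (g.getD (k+2) []).getD 0 0 ::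
        PySem.List.slice (g.getD (k+1) []) (some 1) (some ((c:Int)-1)) ++
        [(g.getD k []).getD (c-1) 0])
    let bot := PySem.List.slice (g.getD (r-1) []) (some 1) none ++ [(g.getD (r-2) []).getD (c-1) 0]
    top :: mid ++ [bot]

def solution_alt (rc : List (List Int)) (operations : List String) : List (List Int) :=
  let c := (rc.headD []).length
  let g := rc.map (fun row => PySem.List.slice row none (some (c:Int)))    -- row[:c]
  operations.foldl (pvStepB c) g

-- ===== PRECONDITION & SPEC =====
-- Pre_ excludes matrices with a single row or a single column: there A's left/right-column and
-- middle-row deques overlap or alias, and A returns accidental values (e.g. a duplicated column),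
-- which are not the intended boundary rotation; also rows shorter than row 0 (A raises IndexError).
def Pre_solution (rc : List (List Int)) (operations : List String) : Prop :=
  2 ≤ rc.length ∧ 2 ≤ (rc.headD []).length ∧ ∀ row ∈ rc, (rc.headD []).length ≤ row.length
instance (rc : List (List Int)) (operations : List String) : Decidable (Pre_solution rc operations) := by
  unfold Pre_solution; infer_instance

def pvWitness_solution : List (List Int) × List String :=
  ([[1, 2, 3], [4, 5, 6], [7, 8, 9]], ["Rotate", "ShiftRow", "Rotate"])

def Spec_solution (rc : List (List Int)) (operations : List String) (out : List (List Int)) : Prop :=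
  out = solution_alt rc operations
instance (rc : List (List Int)) (operations : List String) (out : List (List Int)) : Decidable (Spec_solution rc operations out) := by
  unfold Spec_solution; infer_instance

-- ===== CLAIM (what is proved, stated in full; the proofs are below) =====
def Claim_equal_solution : Prop := ∀ (rc : List (List Int)) (operations : List String),
  Dom_solution rc operations → Pre_solution rc operations →
  Spec_solution rc operations (solution rc operations)

-- ===== LEMMAS AND PROOFS =====

-- glue a left column, middle rows and a right column back into a grid
def pvGlue (L : List Int) (M : List (List Int)) (R : List Int) : List (List Int) :=
  List.zipWith (fun a p => a :: p.1 ++ [p.2]) L (M.zip R)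

-- state invariant of A's loop
def pvInv (r c : Nat) (s : List Int × List (List Int) × List Int) : Prop :=
  s.1.length = r ∧ s.2.1.length = r ∧ s.2.2.length = r ∧ ∀ m ∈ s.2.1, m.length = c - 2

lemma pvGlue_length (L : List Int) (M : List (List Int)) (R : List Int)
    (hM : M.length = L.length) (hR : R.length = L.length) :
    (pvGlue L M R).length = L.length := by
  simp [pvGlue, hM, hR]

lemma pvGlue_getElem (L : List Int) (M : List (List Int)) (R : List Int)
    (hM : M.length = L.length) (hR : R.length = L.length) (i : Nat) (hi : i < L.length) :
    (pvGlue L M R)[i]'(by rw [pvGlue_length L M R hM hR]; exact hi) =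
      L[i] :: M[i]'(by omega) ++ [R[i]'(by omega)] := by
  simp [pvGlue]

lemma pvGlue_append (L : List Int) (M : List (List Int)) (R : List Int) (a : Int) (m : List Int) (b : Int)
    (hM : M.length = L.length) (hR : R.length = L.length) :
    pvGlue (L ++ [a]) (M ++ [m]) (R ++ [b]) = pvGlue L M R ++ [a :: m ++ [b]] := by
  unfold pvGlue
  rw [List.zip_append (by omega), List.zipWith_append (h := by simp [List.length_zip]; omega)]
  rfl

lemma pvGlue_getD (L : List Int) (M : List (List Int)) (R : List Int)
    (hM : M.length = L.length) (hR : R.length = L.length) (j : Nat) (hj : j < L.length) :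
    (pvGlue L M R).getD j [] = L.getD j 0 :: M.getD j [] ++ [R.getD j 0] := by
  rw [List.getD_eq_getElem _ _ (by rw [pvGlue_length L M R hM hR]; exact hj),
      pvGlue_getElem L M R hM hR j hj,
      List.getD_eq_getElem _ _ hj, List.getD_eq_getElem _ _ (by omega),
      List.getD_eq_getElem _ _ (by omega)]

lemma pvGetLastD_eq {α : Type} (l : List α) (d : α) (h : l ≠ []) :
    l.getLastD d = l[l.length - 1]'(by cases l <;> simp_all) := by
  rw [List.getLastD_eq_getLast?, List.getLast?_eq_getElem?]
  rw [List.getElem?_eq_getElem (by cases l <;> simp_all)]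
  rfl

lemma pvHeadD_cons_tail {α : Type} (l : List α) (d : α) (h : l ≠ []) :
    l.headD d :: l.tail = l := by cases l <;> simp_all

lemma pvDropLast_getLastD {α : Type} (l : List α) (d : α) (h : l ≠ []) :
    l.dropLast ++ [l.getLastD d] = l := by
  obtain (rfl | ⟨l', a, rfl⟩) := l.eq_nil_or_concat
  · simp_all
  · simp

lemma pvRow_last (a : Int) (m : List Int) (b : Int) (c : Nat)
    (hm : m.length = c - 2) (hc : 2 ≤ c) :
    (a :: (m ++ [b])).getD (c-1) 0 = b := by
  rw [show a :: (m ++ [b]) = (a :: m) ++ [b] by simp,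
      show c - 1 = (a :: m).length by simp [hm]; omega]
  rw [List.getD_eq_getElem _ _ (by simp)]
  simp

-- ShiftRow step commutes with pvGlue
lemma pvStep_shift (r c : Nat) (hr : 2 ≤ r) (s : List Int × List (List Int) × List Int)
    (h : pvInv r c s) (op : String) (hop : (op == "ShiftRow") = true) :
    pvStepB c (pvGlue s.1 s.2.1 s.2.2) op =
      pvGlue (pvStepA r s op).1 (pvStepA r s op).2.1 (pvStepA r s op).2.2 ∧
    pvInv r c (pvStepA r s op) := by
  obtain ⟨L, M, R⟩ := s
  obtain ⟨hL, hM, hR, hMc⟩ := h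
  simp only at hL hM hR hMc
  obtain (rfl | ⟨L', la, rfl⟩) := L.eq_nil_or_concat; · simp at hL; omega
  obtain (rfl | ⟨M', ma, rfl⟩) := M.eq_nil_or_concat; · simp at hM; omega
  obtain (rfl | ⟨R', ra, rfl⟩) := R.eq_nil_or_concat; · simp at hR; omega
  simp only [List.concat_eq_append] at *
  simp at hL hM hR
  rw [pvGlue_append L' M' R' la ma ra (by omega) (by omega)]
  constructor
  · simp [pvStepB, pvStepA, hop, PySem.List.pyGetD_neg_one_append_singleton,
      PySem.List.slice_to_neg_one, pvGlue]
  · refine ⟨by simp [pvStepA, hop]; omega, by simp [pvStepA, hop]; omega,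
      by simp [pvStepA, hop]; omega, ?_⟩
    simp only [pvStepA, hop, if_true]
    intro m hm
    simp only [List.getLastD_concat, List.dropLast_concat] at hm
    rcases List.mem_cons.1 hm with rfl | hm
    · exact hMc m (by simp)
    · exact hMc m (by simp [hm])

-- Rotate step commutes with pvGlue
lemma pvDropLast_cons (a : Int) (m : List Int) :
    (a :: m).dropLast ++ [m.getLastD a] = a :: m := by
  rw [show m.getLastD a = (a :: m).getLastD 0 from (List.getLastD_cons (a := 0) (b := a) (l := m)).symm]
  exact pvDropLast_getLastD _ _ (by simp)

lemma pvGetD_set_ne {α : Type} (l : List α) (d : α) (i j : Nat) (x : α)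
    (h : i ≠ j) (hj : j < l.length) :
    (l.set i x).getD j d = l.getD j d := by
  rw [List.getD_eq_getElem _ _ (by simpa using hj), List.getElem_set_ne h,
      List.getD_eq_getElem _ _ hj]

lemma pvGetD_set_self {α : Type} (l : List α) (d : α) (i : Nat) (x : α)
    (h : i < l.length) :
    (l.set i x).getD i d = x := by
  rw [List.getD_eq_getElem _ _ (by simpa using h), List.getElem_set_self]

lemma pvGetD_map_range (n j : Nat) (f : Nat → List Int) (hj : j < n) :
    ((List.range n).map f).getD j [] = f j := by
  rw [List.getD_eq_getElem _ _ (by simpa using hj), List.getElem_map, List.getElem_range]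

lemma pvStep_rot (r c : Nat) (hr : 2 ≤ r) (hc : 2 ≤ c) (s : List Int × List (List Int) × List Int)
    (h : pvInv r c s) (op : String) (hop : (op == "ShiftRow") = false) :
    pvStepB c (pvGlue s.1 s.2.1 s.2.2) op =
      pvGlue (pvStepA r s op).1 (pvStepA r s op).2.1 (pvStepA r s op).2.2 ∧
    pvInv r c (pvStepA r s op) := by
  obtain ⟨n, rfl⟩ : ∃ n, r = n + 2 := ⟨r - 2, by omega⟩
  obtain ⟨L, M, R⟩ := s
  obtain ⟨hL, hM, hR, hMc⟩ := h
  simp only at hL hM hR hMc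
  rcases L with _ | ⟨a, L1⟩; · simp at hL
  rcases M with _ | ⟨m0, M1⟩; · simp at hM
  rcases R with _ | ⟨r0, R1⟩; · simp at hR
  simp only [List.length_cons] at hL hM hR
  have hm0 : m0.length = c - 2 := hMc m0 (by simp)
  have hM1c : ∀ m ∈ M1, m.length = c - 2 := fun m hm => hMc m (by simp [hm])
  have hc1 : ((c:Int) - 1) = ((c-1 : Nat) : Int) := by omega
  have hglen : (pvGlue (a::L1) (m0::M1) (r0::R1)).length = n+2 := by
    rw [pvGlue_length _ _ _ (by simp; omega) (by simp; omega)]; simpa using hL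
  have hG : ∀ j, j < n+2 → (pvGlue (a::L1) (m0::M1) (r0::R1)).getD j []
      = (a::L1).getD j 0 :: ((m0::M1).getD j [] ++ [(r0::R1).getD j 0]) := by
    intro j hj
    exact (pvGlue_getD _ _ _ (by simp; omega) (by simp; omega) j
      (by simp only [List.length_cons]; omega)).trans (List.cons_append ..)
  have hsliceTop : ∀ xs : List Int, PySem.List.slice xs none (some ((c:Int)-1)) = xs.take (c-1) := by
    intro xs; rw [hc1, PySem.List.slice_to_natCast]
  have hsliceMid : ∀ xs : List Int, PySem.List.slice xs (some 1) (some ((c:Int)-1)) = (xs.drop 1).take (c-2) := by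
    intro xs
    rw [hc1, show (1:Int) = ((1:Nat):Int) from rfl, PySem.List.slice_natCast]
    simp [show c-1-1 = c-2 from by omega]
  have hMj : ∀ j, j < n+1 → (M1.getD j ([]:List Int)).length = c - 2 := by
    intro j hj
    rw [List.getD_eq_getElem _ _ (by omega)]
    exact hM1c _ (List.getElem_mem _)
  have hrow : ∀ j, j < n+1 → ((m0::M1).getD j ([]:List Int)).length = c - 2 := by
    intro j hj
    rcases j with _ | j'
    · simpa using hm0
    · simp only [List.getD_cons_succ]; exact hMj j' (by omega)
  constructor
  · simp only [pvStepA, pvStepB, hop, Bool.false_eq_true, if_false, List.headD_cons,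
      List.tail_cons, List.set_cons_zero, List.getLastD_cons, List.dropLast_cons₂,
      hsliceTop, hsliceMid, PySem.List.slice_from_one, hglen, List.cons_append,
      show n+2-1 = n+1 from by omega, show n+2-2 = n from by omega]
    set mid := (List.range n).map (fun k =>
      ((pvGlue (a::L1) (m0::M1) (r0::R1)).getD (k+2) []).getD 0 0 ::
        ((((pvGlue (a::L1) (m0::M1) (r0::R1)).getD (k+1) []).drop 1).take (c-2) ++
        [((pvGlue (a::L1) (m0::M1) (r0::R1)).getD k []).getD (c-1) 0])) with hmid
    have hmidlen : mid.length = n := by rw [hmid]; simp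
    apply List.ext_getElem
    · rw [pvGlue_length _ _ _ (by simp; omega) (by simp; omega)]
      simp [hmidlen]; omega
    intro i h1 h2
    rw [← List.getD_eq_getElem _ ([]:List Int) h1, ← List.getD_eq_getElem _ ([]:List Int) h2]
    have hi : i < n + 2 := by
      have := h2
      rw [pvGlue_length _ _ _ (by simp; omega) (by simp; omega)] at this
      simp at this; omega
    rw [pvGlue_getD _ _ _ (by simp; omega) (by simp; omega) i (by simp only [List.length_append, List.length_cons]; omega)]
    simp only [List.cons_append]
    rcases i with _ | j
    · -- top row
      simp only [List.getD_cons_zero]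
      rw [hG 1 (by omega), hG 0 (by omega)]
      rw [List.getD_append _ _ _ _ (show 0 < L1.length by omega)]
      rw [pvGetD_set_ne _ _ _ _ _ (by omega) (by simp)]
      simp only [List.getD_cons_zero, List.getD_cons_succ]
      rw [show c-1 = (c-2)+1 from by omega, List.take_succ_cons,
          List.take_append_of_le_length (by omega), List.take_of_length_le (by omega)]
      rw [pvDropLast_cons a m0]
    · simp only [List.getD_cons_succ]
      rcases Nat.lt_or_ge j n with hj | hj
      · -- middle rows
        rw [List.getD_append _ _ _ _ (show j < mid.length by rw [hmidlen]; omega)]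
        rw [hmid, pvGetD_map_range _ _ _ hj]
        rw [hG (j+2) (by omega), hG (j+1) (by omega), hG j (by omega)]
        rw [List.getD_append _ _ _ _ (show j+1 < L1.length by omega)]
        rw [pvGetD_set_ne _ _ _ _ _ (by omega) (by simp; omega)]
        simp only [List.getD_cons_zero, List.getD_cons_succ, List.drop_one, List.tail_cons]
        rw [List.take_append_of_le_length (by rw [hMj j (by omega)]),
            List.take_of_length_le (by rw [hMj j (by omega)])]
        rw [pvRow_last _ _ _ c (hrow j (by omega)) hc]
        rw [List.getD_eq_getElem ((r0::R1).dropLast) 0 (by simp; omega), List.getElem_dropLast,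
            List.getD_eq_getElem (r0::R1) 0 (by simp; omega)]
      · -- bottom row
        have hjn : j = n := by omega
        rw [hjn]
        rw [List.getD_append_right _ _ _ _ (show mid.length ≤ n from by rw [hmidlen])]
        simp only [hmidlen, Nat.sub_self, List.getD_cons_zero]
        rw [hG (n+1) (by omega), hG n (by omega)]
        simp only [List.tail_cons, List.getD_cons_succ]
        rw [pvRow_last _ _ _ c (hrow n (by omega)) hc]
        rw [List.getD_append_right _ _ _ _ (show L1.length ≤ n+1 by omega),
            show n+1 - L1.length = 0 from by omega, List.getD_cons_zero]
        rw [pvGetD_set_self _ _ _ _ (by simp; omega)]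
        rw [← List.cons_append, pvHeadD_cons_tail _ _ (by simp)]
        rw [pvGetLastD_eq R1 r0 (by intro h0; rw [h0] at hR; simp at hR)]
        simp only [show R1.length - 1 = n from by omega]
        rw [List.getD_eq_getElem R1 0 (show n < R1.length by omega)]
        rw [List.getD_eq_getElem ((r0::R1).dropLast) 0 (by simp; omega), List.getElem_dropLast]
        rw [List.getD_eq_getElem (r0::R1) 0 (by simp; omega)]
  · refine ⟨?_, ?_, ?_, ?_⟩
    · simp [pvStepA, hop]; omega
    · simp [pvStepA, hop]; omega
    · simp [pvStepA, hop]; omega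
    · simp only [pvStepA, hop, Bool.false_eq_true, if_false, List.headD_cons,
        List.tail_cons, List.set_cons_zero]
      intro m hm
      rcases List.mem_or_eq_of_mem_set hm with hm' | rfl
      · rcases List.mem_cons.1 hm' with rfl | hm''
        · simp; omega
        · exact hM1c _ hm''
      · simp only [List.length_tail, List.length_append, List.length_cons,
          List.getD_cons_succ, show n+2-1 = n+1 from by omega]
        rw [List.getD_eq_getElem _ _ (show n < M1.length by omega)]
        rw [hM1c _ (List.getElem_mem _)]
        simp

lemma pvStep (r c : Nat) (hr : 2 ≤ r) (hc : 2 ≤ c) (s : List Int × List (List Int) × List Int)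
    (h : pvInv r c s) (op : String) :
    pvStepB c (pvGlue s.1 s.2.1 s.2.2) op =
      pvGlue (pvStepA r s op).1 (pvStepA r s op).2.1 (pvStepA r s op).2.2 ∧
    pvInv r c (pvStepA r s op) := by
  rcases hb : (op == "ShiftRow") with _ | _
  · exact pvStep_rot r c hr hc s h op hb
  · exact pvStep_shift r c hr s h op hb

lemma pvFold (r c : Nat) (hr : 2 ≤ r) (hc : 2 ≤ c) (ops : List String) :
    ∀ (s : List Int × List (List Int) × List Int), pvInv r c s →
    ops.foldl (pvStepB c) (pvGlue s.1 s.2.1 s.2.2) =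
      pvGlue (ops.foldl (pvStepA r) s).1 (ops.foldl (pvStepA r) s).2.1 (ops.foldl (pvStepA r) s).2.2 ∧
    pvInv r c (ops.foldl (pvStepA r) s) := by
  induction ops with
  | nil => intro s h; exact ⟨rfl, h⟩
  | cons op ops ih =>
    intro s h
    obtain ⟨heq, hinv⟩ := pvStep r c hr hc s h op
    simpa [List.foldl_cons, heq] using ih (pvStepA r s op) hinv

-- a row of length ≥ c split as A reads it
lemma pvRow_split (row : List Int) (c : Nat) (hc : 2 ≤ c) (h : c ≤ row.length) :
    row.take c = row.getD 0 0 :: (row.drop 1).take (c-2) ++ [row.getD (c-1) 0] := by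
  obtain ⟨k, rfl⟩ : ∃ k, c = k + 2 := ⟨c - 2, by omega⟩
  rcases row with _ | ⟨x, t⟩
  · simp at h
  · simp only [List.length_cons] at h
    have hk : k < t.length := by omega
    rw [show k+2-2 = k from by omega, show k+2-1 = k+1 from by omega]
    rw [show k+2 = (k+1)+1 from rfl, List.take_succ_cons]
    simp only [List.drop_one, List.tail_cons, List.getD_cons_zero, List.getD_cons_succ,
      List.cons_append, List.cons.injEq, true_and]
    apply List.ext_getElem
    · simp; omega
    intro i h1 h2
    rcases Nat.lt_or_ge i k with hik | hik
    · rw [List.getElem_append_left (by simp; omega)]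
      simp [List.getElem_take]
    · have hi : i = k := by simp at h1; omega
      subst hi
      rw [List.getElem_append_right (by simp)]
      simp [List.getElem?_eq_getElem hk]

lemma pvOut (r : Nat) (L : List Int) (M : List (List Int)) (R : List Int)
    (hL : L.length = r) (hM : M.length = r) (hR : R.length = r) :
    (List.range r).map (fun i => L.getD i 0 :: M.getD i [] ++ [R.getD i 0]) = pvGlue L M R := by
  apply List.ext_getElem
  · rw [pvGlue_length _ _ _ (by omega) (by omega)]
    simp; omega
  intro i h1 h2
  have hir : i < r := by simpa using h1
  simp only [List.getElem_map, List.getElem_range]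
  rw [pvGlue_getElem _ _ _ (by omega) (by omega) i (by omega)]
  rw [List.getD_eq_getElem L 0 (by omega), List.getD_eq_getElem M [] (by omega),
      List.getD_eq_getElem R 0 (by omega)]

theorem solution_spec : Claim_equal_solution := by
  unfold Claim_equal_solution
  intro rc ops hdom hpre
  unfold Spec_solution
  obtain ⟨hr2, hc2, hrows⟩ := hpre
  simp only [solution, solution_alt]
  have hsliceMid : ∀ xs : List Int, PySem.List.slice xs (some 1) (some (((rc.headD []).length:Int)-1))
      = (xs.drop 1).take ((rc.headD []).length-2) := by
    intro xs
    rw [show (((rc.headD []).length:Int) - 1) = (((rc.headD []).length-1 : Nat) : Int) from by omega,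
        show (1:Int) = ((1:Nat):Int) from rfl, PySem.List.slice_natCast]
    rw [show (rc.headD []).length-1-1 = (rc.headD []).length-2 from by omega]
  have hg0 : rc.map (fun row => PySem.List.slice row none (some ((rc.headD []).length : Int)))
      = pvGlue ((List.range rc.length).map (fun i => (rc.getD i []).getD 0 0))
          ((List.range rc.length).map (fun i =>
            PySem.List.slice (rc.getD i []) (some 1) (some (((rc.headD []).length:Int)-1))))
          ((List.range rc.length).map (fun i => (rc.getD i []).getD ((rc.headD []).length-1) 0)) := by
    apply List.ext_getElem
    · rw [pvGlue_length _ _ _ (by simp) (by simp)]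
      simp
    intro i h1 h2
    have hir : i < rc.length := by simpa using h1
    simp only [List.getElem_map]
    rw [pvGlue_getElem _ _ _ (by simp) (by simp) i (by simpa using hir)]
    simp only [List.getElem_map, List.getElem_range]
    rw [PySem.List.slice_to_natCast, hsliceMid]
    rw [List.getD_eq_getElem rc [] hir]
    exact pvRow_split rc[i] (rc.headD []).length hc2 (hrows _ (List.getElem_mem _))
  have hInv0 : pvInv rc.length (rc.headD []).length
      (((List.range rc.length).map (fun i => (rc.getD i []).getD 0 0)),
       ((List.range rc.length).map (fun i =>
         PySem.List.slice (rc.getD i []) (some 1) (some (((rc.headD []).length:Int)-1)))),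
       ((List.range rc.length).map (fun i => (rc.getD i []).getD ((rc.headD []).length-1) 0))) := by
    refine ⟨by simp, by simp, by simp, ?_⟩
    intro m hm
    simp only [List.mem_map, List.mem_range] at hm
    obtain ⟨i, hi, rfl⟩ := hm
    rw [hsliceMid]
    have : (rc.headD []).length ≤ (rc.getD i []).length := by
      apply hrows
      rw [List.getD_eq_getElem rc [] hi]
      exact List.getElem_mem _
    rw [List.length_take, List.length_drop]
    omega
  obtain ⟨hfold, hfinv⟩ := pvFold rc.length (rc.headD []).length hr2 hc2 ops _ hInv0
  rw [hg0, hfold]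
  obtain ⟨hl, hm, hr, _⟩ := hfinv
  exact pvOut rc.length _ _ _ hl hm hr
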